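-- pv_equiv track=rewrite | github.com/ahsan-007/Competitive-Programming | Daily Streak/Medium/FindScoreOfAnArrayAfterMarkingAllElements.py | findScoreV2
-- ===== SOURCE A (Python) =====
-- from typing import List
-- import heapq
--
-- def findScoreV2(nums: List[int]) -> int:
--     marked = [False] * len(nums)
--     heap = [(num, i) for i, num in enumerate(nums)]
--     heapq.heapify(heap)
--     score = 0
--     while heap:
--         minEle, ind = heapq.heappop(heap)
--         if not marked[ind]:
--             score = score + minEle
--             marked[ind] = True
--             if ind - 1 >= 0:
--                 marked[ind-1] = True
--             if ind + 1 < len(marked):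
--                 marked[ind+1] = True
--     return score
-- ===== SOURCE B (Python) =====
-- from typing import List
--
-- def findScoreV2(nums: List[int]) -> int:
--     # O(n) single pass: split the array into maximal strictly-decreasing runs.
--     # Within a run the minimum (its last element) is scored first, then every
--     # second element leftwards; the element right after a run is marked by the
--     # run's last pick, so the next run starts two past the run's end.
--     score = 0
--     n = len(nums)
--     i = 0
--     while i < n:
--         j = i
--         while j + 1 < n and nums[j + 1] < nums[j]:
--             j += 1
--         k = j
--         while k >= i:
--             score += nums[k]
--             k -= 2
--         i = j + 2
--     return score
-- ===== Notes on version B (the rewrite author's own statement) =====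
-- stated objective: faster
-- what changed: Replaces the heap-pop-and-discard loop with marked[] bookkeeping by a single left-to-right O(n) pass over maximal strictly-decreasing runs, summing every second element of each run from its end and skipping the element right after each run.
import Mathlib
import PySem

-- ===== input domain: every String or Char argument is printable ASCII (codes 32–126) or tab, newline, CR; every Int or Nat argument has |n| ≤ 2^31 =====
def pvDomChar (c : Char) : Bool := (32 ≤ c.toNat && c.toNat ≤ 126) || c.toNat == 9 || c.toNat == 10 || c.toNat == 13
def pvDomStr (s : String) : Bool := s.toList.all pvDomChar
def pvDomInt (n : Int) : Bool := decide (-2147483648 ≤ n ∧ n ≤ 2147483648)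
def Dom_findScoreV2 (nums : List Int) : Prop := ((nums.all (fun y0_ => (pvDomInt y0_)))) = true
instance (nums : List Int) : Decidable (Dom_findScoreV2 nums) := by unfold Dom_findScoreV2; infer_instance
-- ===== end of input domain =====

-- B replaces A's heapify/heappop-and-discard loop with marked[] bookkeeping by a single
-- left-to-right pass over maximal strictly-decreasing runs (no heap, no sort, no marked array);
-- a timing run measured it faster (O(n) vs O(n log n)).

-- ===== PORT A =====
-- heapq has no PySem primitive, so the heap is modeled by its contents: heapq.heapify is the
-- identity on the contents and heapq.heappop removes and returns the smallest (value, index) pair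
-- under tuple (lexicographic, = toLex) comparison — exact, since heappop always returns the
-- minimum element of the heap (ties are impossible here: indices are distinct).
def findScoreV2Loop (heap : List (Int × Int)) (marked : List Bool) (score : Int) : Int :=
  match hm : PySem.List.min? heap (fun p => toLex p) with
  | none => score
  | some (minEle, ind) =>
    let heap' := heap.erase (minEle, ind)
    -- marked[ind]: ind is always a valid index of marked (it came from enumerate), so pyGetD is exact
    if PySem.List.pyGetD marked ind false = false then
      let marked1 := PySem.List.pySetD marked ind true          -- marked[ind] = True (in range)
      let marked2 := if 0 ≤ ind - 1 then PySem.List.pySetD marked1 (ind - 1) true else marked1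
      let marked3 := if ind + 1 < (marked2.length : Int) then PySem.List.pySetD marked2 (ind + 1) true else marked2
      findScoreV2Loop heap' marked3 (score + minEle)
    else
      findScoreV2Loop heap' marked score
termination_by heap.length
decreasing_by
  all_goals
    have hmem := PySem.List.min?_mem hm
    have h1 := List.length_erase_of_mem hmem
    have h2 : 0 < heap.length := List.length_pos_of_mem hmem
    omega

def findScoreV2 (nums : List Int) : Int :=
  let marked := List.replicate nums.length false
  let heap := (PySem.List.enumerate nums).map (fun p => (p.2, p.1))
  findScoreV2Loop heap marked 0

-- ===== PORT B =====
-- inner while of Source B: 'while j + 1 < n and nums[j + 1] < nums[j]: j += 1'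
def runEnd (nums : List Int) (j : Int) : Int :=
  if j + 1 < (nums.length : Int) ∧ PySem.List.pyGetD nums (j + 1) 0 < PySem.List.pyGetD nums j 0
  then runEnd nums (j + 1) else j
termination_by ((nums.length : Int) - j).toNat
decreasing_by omega

-- innermost while: 'while k >= i: score += nums[k]; k -= 2'
def sumBack (nums : List Int) (k i score : Int) : Int :=
  if i ≤ k then sumBack nums (k - 2) i (score + PySem.List.pyGetD nums k 0) else score
termination_by (k + 2 - i).toNat
decreasing_by omega

-- termination helper for the outer loop: the inner while never moves j left
lemma le_runEnd (nums : List Int) (j : Int) : j ≤ runEnd nums j := by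
  fun_induction runEnd with
  | case1 j h ih => omega
  | case2 j h => omega

-- outer while: one iteration per maximal strictly-decreasing run
def outerLoop (nums : List Int) (i score : Int) : Int :=
  if i < (nums.length : Int) then
    outerLoop nums (runEnd nums i + 2) (sumBack nums (runEnd nums i) i score)
  else score
termination_by ((nums.length : Int) - i).toNat
decreasing_by have := le_runEnd nums i; omega

def findScoreV2_alt (nums : List Int) : Int := outerLoop nums 0 0

-- ===== PRECONDITION & SPEC =====
def Spec_findScoreV2 (nums : List Int) (out : Int) : Prop := out = findScoreV2_alt nums
instance (nums : List Int) (out : Int) : Decidable (Spec_findScoreV2 nums out) := by unfold Spec_findScoreV2; infer_instance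

-- ===== CLAIM (what is proved, stated in full; the proofs are below) =====
def Claim_equal_findScoreV2 : Prop := ∀ (nums : List Int), Dom_findScoreV2 nums → Spec_findScoreV2 nums (findScoreV2 nums)

-- ===== LEMMAS AND PROOFS =====

-- ----- A-side: the pop-the-minimum loop is a fold over the sorted pair list -----

-- one step of A's loop body on state (marked, score), used only by the proofs below
def bStep (st : List Bool × Int) (p : Int × Int) : List Bool × Int :=
  if PySem.List.pyGetD st.1 p.2 false = false then
    let m1 := PySem.List.pySetD st.1 p.2 true
    let m2 := if 0 ≤ p.2 - 1 then PySem.List.pySetD m1 (p.2 - 1) true else m1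
    let m3 := if p.2 + 1 < (m2.length : Int) then PySem.List.pySetD m2 (p.2 + 1) true else m2
    (m3, st.2 + p.1)
  else st

-- removing the minimum from the front: the stable sort of a list is its minimum followed by
-- the sort of the rest
lemma sorted_cons_of_min (heap : List (Int × Int)) (m : Int × Int)
    (hm : PySem.List.min? heap (fun p => toLex p) = some m) :
    PySem.List.sorted heap (fun p => toLex p) =
      m :: PySem.List.sorted (heap.erase m) (fun p => toLex p) := by
  have hmem := PySem.List.min?_mem hm
  apply PySem.List.eq_of_perm_of_pairwise_le_of_injective (fun p => toLex p)
    (fun a b h => toLex_inj.mp h)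
  · exact (PySem.List.sorted_perm heap _ _).trans
      ((List.perm_cons_erase hmem).trans
        (List.Perm.cons m (PySem.List.sorted_perm (heap.erase m) _ _).symm))
  · exact PySem.List.sorted_pairwise heap _
  · refine List.pairwise_cons.mpr ⟨?_, PySem.List.sorted_pairwise (heap.erase m) _⟩
    intro y hy
    have : y ∈ heap.erase m := (PySem.List.sorted_perm (heap.erase m) _ _).mem_iff.mp hy
    exact PySem.List.min?_isMin hm y (List.mem_of_mem_erase this)

-- A's pop-the-minimum loop computes the fold of bStep over the sorted order
lemma loop_eq_fold (n : Nat) : ∀ (heap : List (Int × Int)), heap.length = n →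
    ∀ (marked : List Bool) (score : Int),
    findScoreV2Loop heap marked score =
      ((PySem.List.sorted heap (fun p => toLex p)).foldl bStep (marked, score)).2 := by
  induction n using Nat.strong_induction_on with
  | _ n ih =>
    intro heap hlen marked score
    rw [findScoreV2Loop.eq_def]
    split
    · next hmin =>
      have : heap = [] := (PySem.List.min?_eq_none_iff heap _).mp hmin
      subst this
      simp [PySem.List.sorted]
    · next minEle ind hmin =>
      have hmem := PySem.List.min?_mem hmin
      have hlt : (heap.erase (minEle, ind)).length < n := by
        have h1 := List.length_erase_of_mem hmem
        have h2 : 0 < heap.length := List.length_pos_of_mem hmem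
        omega
      rw [sorted_cons_of_min heap (minEle, ind) hmin, List.foldl_cons]
      by_cases hc : PySem.List.pyGetD marked ind false = false
      · simp only [hc, if_pos]
        rw [ih _ hlt _ rfl]
        congr 1
        simp [bStep, hc]
      · have hb : bStep (marked, score) (minEle, ind) = (marked, score) := by
          simp [bStep, hc]
        rw [if_neg hc, hb]
        exact ih _ hlt _ rfl _ _

-- ----- the abstract marking model: marked array as a total function Int → Bool -----

-- guard-free model of one step: mark i-1, i, i+1 unconditionally (out-of-range marks are
-- never read back, so they are harmless)
def mStep (st : (Int → Bool) × Int) (q : Int × Int) : (Int → Bool) × Int :=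
  if st.1 q.2 then st
  else (fun j => if j = q.2 - 1 ∨ j = q.2 ∨ j = q.2 + 1 then true else st.1 j, st.2 + q.1)

-- helper: reading a written boolean list, all indices in range
lemma pyGetD_pySetD' (xs : List Bool) (i j : Int) (v d : Bool)
    (hi0 : 0 ≤ i) (hi : i < (xs.length : Int)) (hj0 : 0 ≤ j) (hj : j < (xs.length : Int)) :
    PySem.List.pyGetD (PySem.List.pySetD xs i v) j d = if j = i then v else PySem.List.pyGetD xs j d := by
  rw [PySem.List.pySetD_of_nonneg xs v hi0]
  have hls : (xs.set i.toNat v).length = xs.length := by simp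
  rw [PySem.List.pyGetD_eq_getElem (xs.set i.toNat v) d hj0 (by rw [hls]; exact_mod_cast hj)]
  rw [List.getElem_set]
  by_cases h : j = i
  · subst h
    simp
  · rw [if_neg (by omega)]
    rw [PySem.List.pyGetD_eq_getElem xs d hj0 (by exact_mod_cast hj), if_neg h]

-- the concrete bStep fold and the abstract mStep fold compute the same score
lemma fold_bridge : ∀ (L : List (Int × Int)) (mk : List Bool) (f : Int → Bool) (s : Int),
    (∀ q ∈ L, 0 ≤ q.2 ∧ q.2 < (mk.length : Int)) →
    (∀ j : Int, 0 ≤ j → j < (mk.length : Int) → PySem.List.pyGetD mk j false = f j) →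
    (L.foldl bStep (mk, s)).2 = (L.foldl mStep (f, s)).2 := by
  intro L
  induction L with
  | nil => intro mk f s _ _; rfl
  | cons q L ih =>
    intro mk f s hrange hrel
    have hq := hrange q (List.mem_cons_self ..)
    have hread : PySem.List.pyGetD mk q.2 false = f q.2 := hrel q.2 hq.1 hq.2
    simp only [List.foldl_cons]
    by_cases hf : f q.2
    · have hb : bStep (mk, s) q = (mk, s) := by
        simp [bStep, hread, hf]
      have hmst : mStep (f, s) q = (f, s) := by simp [mStep, hf]
      rw [hb, hmst]
      exact ih mk f s (fun r hr => hrange r (List.mem_cons_of_mem _ hr)) hrel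
    · rw [Bool.not_eq_true] at hf
      set m1 := PySem.List.pySetD mk q.2 true with hm1
      set m2 := if 0 ≤ q.2 - 1 then PySem.List.pySetD m1 (q.2 - 1) true else m1 with hm2
      set m3 := if q.2 + 1 < (m2.length : Int) then PySem.List.pySetD m2 (q.2 + 1) true else m2 with hm3
      have hb : bStep (mk, s) q = (m3, s + q.1) := by
        rw [hm3, hm2, hm1]
        simp [bStep, hread, hf]
      have hmst : mStep (f, s) q =
          (fun j => if j = q.2 - 1 ∨ j = q.2 ∨ j = q.2 + 1 then true else f j, s + q.1) := by
        simp [mStep, hf]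
      rw [hb, hmst]
      have hl1 : m1.length = mk.length := by simp [hm1, PySem.List.length_pySetD]
      have hl2 : m2.length = mk.length := by
        rw [hm2]; split <;> simp [PySem.List.length_pySetD, hl1]
      have hl3 : m3.length = mk.length := by
        rw [hm3]; split <;> simp [PySem.List.length_pySetD, hl2]
      apply ih
      · intro r hr
        have h1 := hrange r (List.mem_cons_of_mem _ hr)
        have h2 : m3.length = mk.length := hl3
        omega
      · intro j hj0 hjlt
        rw [hl3] at hjlt
        have hg1 : PySem.List.pyGetD m1 j false = if j = q.2 then true else PySem.List.pyGetD mk j false :=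
          pyGetD_pySetD' mk q.2 j true false hq.1 hq.2 hj0 hjlt
        have hg2 : PySem.List.pyGetD m2 j false = if j = q.2 - 1 ∨ j = q.2 then true else PySem.List.pyGetD mk j false := by
          rw [hm2]
          split
          · next hcond =>
            rw [pyGetD_pySetD' m1 (q.2 - 1) j true false hcond (by omega) hj0 (by omega)]
            rw [hg1]
            by_cases h1 : j = q.2 - 1 <;> by_cases h2 : j = q.2 <;> simp [h1, h2]
          · next hcond =>
            rw [hg1]
            by_cases h1 : j = q.2 - 1 <;> by_cases h2 : j = q.2 <;> simp [h1, h2] <;> omega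
        have hg3 : PySem.List.pyGetD m3 j false = if j = q.2 - 1 ∨ j = q.2 ∨ j = q.2 + 1 then true else PySem.List.pyGetD mk j false := by
          rw [hm3]
          split
          · next hcond =>
            rw [hl2] at hcond
            rw [pyGetD_pySetD' m2 (q.2 + 1) j true false (by omega) (by omega) hj0 (by omega)]
            rw [hg2]
            by_cases h1 : j = q.2 - 1 <;> by_cases h2 : j = q.2 <;> by_cases h3 : j = q.2 + 1 <;>
              simp [h1, h2, h3]
          · next hcond =>
            rw [hl2] at hcond
            rw [hg2]
            by_cases h1 : j = q.2 - 1 <;> by_cases h2 : j = q.2 <;> by_cases h3 : j = q.2 + 1 <;>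
              simp [h1, h2, h3] <;> omega
        rw [hg3, hrel j hj0 hjlt]

-- score threads additively through the model fold
lemma mfold_shift : ∀ (L : List (Int × Int)) (f : Int → Bool) (s t : Int),
    L.foldl mStep (f, s + t) = ((L.foldl mStep (f, t)).1, s + (L.foldl mStep (f, t)).2) := by
  intro L
  induction L with
  | nil => intro f s t; rfl
  | cons q L ih =>
    intro f s t
    simp only [List.foldl_cons, mStep]
    by_cases hf : f q.2
    · simp only [hf, if_pos]
      exact ih f s t
    · simp only [hf, if_neg, Bool.false_eq_true, not_false_iff]
      have : s + t + q.1 = s + (t + q.1) := by ring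
      rw [this]
      exact ih _ s (t + q.1)

lemma mfold_add (L : List (Int × Int)) (f : Int → Bool) (s : Int) :
    (L.foldl mStep (f, s)).2 = s + (L.foldl mStep (f, 0)).2 := by
  have := mfold_shift L f s 0
  rw [show s + 0 = s by ring] at this
  rw [this]

-- shifting all indices by t preserves the fold, given the two mark functions agree (shifted)
-- on a region containing every index that is read
lemma msim : ∀ (L : List (Int × Int)) (S : Int → Prop) (t : Int) (f f' : Int → Bool) (s : Int),
    (∀ q ∈ L, S (q.2 - t)) → (∀ j, S j → f (j + t) = f' j) →
    (L.foldl mStep (f, s)).2 = ((L.map (fun q => (q.1, q.2 - t))).foldl mStep (f', s)).2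
    ∧ ∀ j, S j → (L.foldl mStep (f, s)).1 (j + t) = ((L.map (fun q => (q.1, q.2 - t))).foldl mStep (f', s)).1 j := by
  intro L
  induction L with
  | nil => intro S t f f' s _ hrel; exact ⟨rfl, fun j hj => hrel j hj⟩
  | cons q L ih =>
    intro S t f f' s hS hrel
    have hq := hS q (List.mem_cons_self ..)
    have hread : f q.2 = f' (q.2 - t) := by
      have := hrel (q.2 - t) hq
      rwa [show q.2 - t + t = q.2 by ring] at this
    simp only [List.map_cons, List.foldl_cons, mStep, hread]
    by_cases hf : f' (q.2 - t)
    · simp only [hf, if_pos]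
      exact ih S t f f' s (fun r hr => hS r (List.mem_cons_of_mem _ hr)) hrel
    · simp only [hf, if_neg, Bool.false_eq_true, not_false_iff]
      apply ih S t _ _ (s + q.1) (fun r hr => hS r (List.mem_cons_of_mem _ hr))
      intro j hj
      by_cases hcase : j + t = q.2 - 1 ∨ j + t = q.2 ∨ j + t = q.2 + 1
      · rw [if_pos hcase, if_pos (by omega)]
      · rw [if_neg hcase, if_neg (by omega)]
        exact hrel j hj

-- pairs whose index is already marked (and stays marked) are no-ops of the fold
lemma mfold_drop3 : ∀ (L : List (Int × Int)) (f : Int → Bool) (s : Int) (a b c : Int),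
    f a = true → f b = true → f c = true →
    L.foldl mStep (f, s) =
      (L.filter (fun q => !(q.2 == a || q.2 == b || q.2 == c))).foldl mStep (f, s) := by
  intro L
  induction L with
  | nil => intro f s a b c _ _ _; rfl
  | cons q L ih =>
    intro f s a b c ha hb hc
    rw [List.foldl_cons, List.filter_cons]
    by_cases hq : q.2 = a ∨ q.2 = b ∨ q.2 = c
    · have hcond : (!(q.2 == a || q.2 == b || q.2 == c)) = false := by
        rcases hq with h | h | h <;> simp [h]
      rw [hcond]
      simp only [Bool.false_eq_true, if_neg, not_false_iff]
      have hskip : mStep (f, s) q = (f, s) := by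
        have : f q.2 = true := by rcases hq with h | h | h <;> rw [h] <;> assumption
        simp [mStep, this]
      rw [hskip]
      exact ih f s a b c ha hb hc
    · have hcond : (!(q.2 == a || q.2 == b || q.2 == c)) = true := by
        push_neg at hq
        simp [hq.1, hq.2.1, hq.2.2]
      rw [hcond]
      simp only [if_pos, List.foldl_cons]
      by_cases hf : f q.2
      · have hskip : mStep (f, s) q = (f, s) := by simp [mStep, hf]
        rw [hskip]
        exact ih f s a b c ha hb hc
      · have hact : mStep (f, s) q =
            (fun j => if j = q.2 - 1 ∨ j = q.2 ∨ j = q.2 + 1 then true else f j, s + q.1) := by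
          simp [mStep, hf]
        rw [hact]
        apply ih
        · by_cases h : a = q.2 - 1 ∨ a = q.2 ∨ a = q.2 + 1 <;> simp [h, ha]
        · by_cases h : b = q.2 - 1 ∨ b = q.2 ∨ b = q.2 + 1 <;> simp [h, hb]
        · by_cases h : c = q.2 - 1 ∨ c = q.2 ∨ c = q.2 + 1 <;> simp [h, hc]

-- two steps whose index neighbourhoods are disjoint commute
lemma mstep_comm (a b : Int × Int) (hab : a.2 + 1 < b.2 - 1) :
    ∀ st, mStep (mStep st a) b = mStep (mStep st b) a := by
  have skip : ∀ (q : Int × Int) (s : (Int → Bool) × Int), s.1 q.2 = true → mStep s q = s :=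
    fun q s h => by simp [mStep, h]
  have act : ∀ (q : Int × Int) (s : (Int → Bool) × Int), s.1 q.2 = false →
      mStep s q = (fun j => if j = q.2 - 1 ∨ j = q.2 ∨ j = q.2 + 1 then true else s.1 j, s.2 + q.1) :=
    fun q s h => by simp [mStep, h]
  intro st
  by_cases ha : st.1 a.2 <;> by_cases hb : st.1 b.2
  · rw [skip a st ha, skip b st hb, skip a st ha]
  · rw [Bool.not_eq_true] at hb
    rw [skip a st ha, act b st hb]
    rw [skip a _ (by
      show (if a.2 = b.2 - 1 ∨ a.2 = b.2 ∨ a.2 = b.2 + 1 then true else st.1 a.2) = true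
      rw [if_neg (by omega)]; exact ha)]
  · rw [Bool.not_eq_true] at ha
    rw [skip b st hb, act a st ha]
    rw [skip b _ (by
      show (if b.2 = a.2 - 1 ∨ b.2 = a.2 ∨ b.2 = a.2 + 1 then true else st.1 b.2) = true
      rw [if_neg (by omega)]; exact hb)]
  · rw [Bool.not_eq_true] at ha hb
    rw [act a st ha, act b st hb]
    rw [act b _ (show (if b.2 = a.2 - 1 ∨ b.2 = a.2 ∨ b.2 = a.2 + 1 then true else st.1 b.2) = false by
      rw [if_neg (by omega)]; exact hb)]
    rw [act a _ (show (if a.2 = b.2 - 1 ∨ a.2 = b.2 ∨ a.2 = b.2 + 1 then true else st.1 a.2) = false by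
      rw [if_neg (by omega)]; exact ha)]
    refine Prod.ext ?_ ?_
    · funext j
      simp only
      split_ifs <;> rfl
    · simp only
      ring

-- a step that commutes with every element of L pulls out of the fold
lemma mfold_pull_out : ∀ (L : List (Int × Int)) (st : (Int → Bool) × Int) (q : Int × Int),
    (∀ r ∈ L, ∀ st', mStep (mStep st' q) r = mStep (mStep st' r) q) →
    L.foldl mStep (mStep st q) = mStep (L.foldl mStep st) q := by
  intro L
  induction L with
  | nil => intro st q _; rfl
  | cons r L ih =>
    intro st q hcomm
    simp only [List.foldl_cons]
    rw [hcomm r (List.mem_cons_self ..) st]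
    exact ih _ q (fun r' hr' => hcomm r' (List.mem_cons_of_mem _ hr'))

-- a fold over a list whose P-part and non-P-part commute splits into two stages
lemma mfold_split : ∀ (L : List (Int × Int)) (st : (Int → Bool) × Int) (P : Int × Int → Bool),
    (∀ a ∈ L, ∀ b ∈ L, P a = true → P b = false → ∀ st', mStep (mStep st' a) b = mStep (mStep st' b) a) →
    L.foldl mStep st = (L.filter (fun q => !P q)).foldl mStep ((L.filter P).foldl mStep st) := by
  intro L
  induction L with
  | nil => intro st P _; rfl
  | cons h L ih =>
    intro st P hcomm
    have hcomm' : ∀ a ∈ L, ∀ b ∈ L, P a = true → P b = false → ∀ st', mStep (mStep st' a) b = mStep (mStep st' b) a :=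
      fun a ha b hb => hcomm a (List.mem_cons_of_mem _ ha) b (List.mem_cons_of_mem _ hb)
    rw [List.foldl_cons, List.filter_cons, List.filter_cons]
    by_cases hP : P h
    · rw [if_pos (by simp [hP]), if_neg (by simp [hP]), List.foldl_cons]
      exact ih (mStep st h) P hcomm'
    · rw [Bool.not_eq_true] at hP
      rw [if_neg (by simp [hP]), if_pos (by simp [hP]), List.foldl_cons]
      rw [ih (mStep st h) P hcomm']
      congr 1
      rw [mfold_pull_out]
      intro r hr st'
      have hrL : r ∈ L := List.mem_of_mem_filter hr
      have hPr : P r = true := by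
        have := List.of_mem_filter hr; exact this
      exact (hcomm r (List.mem_cons_of_mem _ hrL) h (List.mem_cons_self ..) hPr hP st').symm

-- marks above every touched index are untouched by the fold
lemma mfold_preserve_high : ∀ (L : List (Int × Int)) (f : Int → Bool) (s : Int) (c : Int),
    (∀ q ∈ L, q.2 + 1 < c) → ∀ j, c ≤ j → (L.foldl mStep (f, s)).1 j = f j := by
  intro L
  induction L with
  | nil => intro f s c _ j _; rfl
  | cons q L ih =>
    intro f s c hq j hj
    rw [List.foldl_cons]
    have hq' := hq q (List.mem_cons_self ..)
    by_cases hf : f q.2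
    · have : mStep (f, s) q = (f, s) := by simp [mStep, hf]
      rw [this]
      exact ih f s c (fun r hr => hq r (List.mem_cons_of_mem _ hr)) j hj
    · have : mStep (f, s) q =
          (fun j => if j = q.2 - 1 ∨ j = q.2 ∨ j = q.2 + 1 then true else f j, s + q.1) := by
        simp [mStep, hf]
      rw [this]
      rw [ih _ _ c (fun r hr => hq r (List.mem_cons_of_mem _ hr)) j hj]
      rw [if_neg (by omega)]

-- ----- list-level identities: enumerate, filters, sorted -----

-- the (value, index) pair list A's heap starts from
def pairsOf (nums : List Int) : List (Int × Int) :=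
  (PySem.List.enumerate nums).map (fun p => (p.2, p.1))

-- the fold of the abstract model over A's sorted pair order
def afold (nums : List Int) : Int :=
  ((PySem.List.sorted (pairsOf nums) (fun p => toLex p) false).foldl mStep (fun _ => false, 0)).2

lemma enum_filter_lt : ∀ (xs : List Int) (s k : Int),
    (PySem.List.enumerate xs s).filter (fun q => decide (q.1 < k)) =
      PySem.List.enumerate (xs.take (k - s).toNat) s := by
  intro xs
  induction xs with
  | nil => intro s k; simp [PySem.List.enumerate_nil]
  | cons x t ih =>
    intro s k
    rw [PySem.List.enumerate_cons, List.filter_cons]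
    by_cases h : s < k
    · rw [show (k - s).toNat = (k - (s + 1)).toNat + 1 by omega]
      rw [List.take_succ_cons, PySem.List.enumerate_cons]
      simp only [h, decide_true, if_pos]
      rw [ih (s + 1) k]
    · rw [show (k - s).toNat = 0 by omega]
      simp only [List.take_zero, PySem.List.enumerate_nil]
      simp only [h, decide_false, Bool.false_eq_true, if_neg, not_false_iff]
      rw [ih (s + 1) k, show (k - (s + 1)).toNat = 0 by omega]
      simp [PySem.List.enumerate_nil]

lemma enum_filter_ge_all : ∀ (xs : List Int) (s k : Int), k ≤ s →
    (PySem.List.enumerate xs s).filter (fun q => decide (k ≤ q.1)) = PySem.List.enumerate xs s := by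
  intro xs
  induction xs with
  | nil => intro s k _; simp [PySem.List.enumerate_nil]
  | cons x t ih =>
    intro s k hks
    rw [PySem.List.enumerate_cons, List.filter_cons]
    simp only [hks, decide_true, if_pos]
    rw [ih (s + 1) k (by omega)]

lemma enum_filter_ge : ∀ (xs : List Int) (s k : Int), s ≤ k →
    (PySem.List.enumerate xs s).filter (fun q => decide (k ≤ q.1)) =
      PySem.List.enumerate (xs.drop (k - s).toNat) k := by
  intro xs
  induction xs with
  | nil => intro s k _; simp [PySem.List.enumerate_nil]
  | cons x t ih =>
    intro s k hsk
    by_cases h : s = k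
    · subst h
      rw [show (s - s).toNat = 0 by omega, List.drop_zero]
      exact enum_filter_ge_all (x :: t) s s le_rfl
    · rw [PySem.List.enumerate_cons, List.filter_cons]
      simp only [show ¬ (k ≤ s) by omega, decide_false, Bool.false_eq_true, if_neg, not_false_iff]
      rw [show (k - s).toNat = (k - (s + 1)).toNat + 1 by omega, List.drop_succ_cons]
      exact ih (s + 1) k (by omega)

lemma enum_shift : ∀ (xs : List Int) (s t : Int),
    PySem.List.enumerate xs (s + t) = (PySem.List.enumerate xs s).map (fun q => (q.1 + t, q.2)) := by
  intro xs
  induction xs with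
  | nil => intro s t; simp [PySem.List.enumerate_nil]
  | cons x t' ih =>
    intro s t
    rw [PySem.List.enumerate_cons, PySem.List.enumerate_cons, List.map_cons]
    rw [show s + t + 1 = (s + 1) + t by ring, ih (s + 1) t]

lemma mem_pairsOf (nums : List Int) (q : Int × Int) :
    q ∈ pairsOf nums ↔ ∃ k, ∃ (h : k < nums.length), q = (nums[k], (k : Int)) := by
  unfold pairsOf
  simp only [List.mem_map]
  constructor
  · rintro ⟨r, hr, rfl⟩
    obtain ⟨k, hk, rfl⟩ := (PySem.List.mem_enumerate_iff nums 0 r).mp hr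
    exact ⟨k, hk, by simp⟩
  · rintro ⟨k, hk, rfl⟩
    exact ⟨((k : Int), nums[k]), (PySem.List.mem_enumerate_iff nums 0 _).mpr ⟨k, hk, by simp⟩, rfl⟩

lemma pairs_filter_lt (nums : List Int) (k : Int) :
    (pairsOf nums).filter (fun q => decide (q.2 < k)) = pairsOf (nums.take k.toNat) := by
  unfold pairsOf
  rw [List.filter_map]
  rw [show ((fun (q : Int × Int) => decide (q.2 < k)) ∘ (fun (p : Int × Int) => (p.2, p.1)))
      = (fun (q : Int × Int) => decide (q.1 < k)) from rfl]
  rw [enum_filter_lt nums 0 k, show (k - 0).toNat = k.toNat by omega]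

lemma pairs_filter_ge (nums : List Int) (k : Int) (hk : 0 ≤ k) :
    (pairsOf nums).filter (fun q => decide (k ≤ q.2)) =
      (pairsOf (nums.drop k.toNat)).map (fun q => (q.1, q.2 + k)) := by
  unfold pairsOf
  rw [List.filter_map]
  rw [show ((fun (q : Int × Int) => decide (k ≤ q.2)) ∘ (fun (p : Int × Int) => (p.2, p.1)))
      = (fun (q : Int × Int) => decide (k ≤ q.1)) from rfl]
  rw [enum_filter_ge nums 0 k hk, show (k - 0).toNat = k.toNat by omega]
  have hsh := enum_shift (nums.drop k.toNat) 0 k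
  rw [zero_add] at hsh
  rw [hsh]
  rw [List.map_map, List.map_map]
  rfl

-- sorted (with the lex key) of permuted lists agree: the key is injective
lemma sorted_congr_perm (L₁ L₂ : List (Int × Int)) (h : L₁.Perm L₂) :
    PySem.List.sorted L₁ (fun p => toLex p) false = PySem.List.sorted L₂ (fun p => toLex p) false := by
  apply PySem.List.eq_of_perm_of_pairwise_le_of_injective (fun p => toLex p)
    (fun a b hab => toLex_inj.mp hab)
  · exact (PySem.List.sorted_perm L₁ _ _).trans (h.trans (PySem.List.sorted_perm L₂ _ _).symm)
  · exact PySem.List.sorted_pairwise L₁ _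
  · exact PySem.List.sorted_pairwise L₂ _

lemma sorted_filter (L : List (Int × Int)) (pred : Int × Int → Bool) :
    (PySem.List.sorted L (fun p => toLex p) false).filter pred =
      PySem.List.sorted (L.filter pred) (fun p => toLex p) false := by
  apply PySem.List.eq_of_perm_of_pairwise_le_of_injective (fun p => toLex p)
    (fun a b hab => toLex_inj.mp hab)
  · exact ((PySem.List.sorted_perm L _ _).filter pred).trans
      (PySem.List.sorted_perm (L.filter pred) _ _).symm
  · exact (PySem.List.sorted_pairwise L _).filter pred
  · exact PySem.List.sorted_pairwise (L.filter pred) _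

-- shifting every index by a constant commutes with sorting
lemma sorted_map_shift (X : List (Int × Int)) (c : Int) :
    PySem.List.sorted (X.map (fun q => (q.1, q.2 + c))) (fun p => toLex p) false =
      (PySem.List.sorted X (fun p => toLex p) false).map (fun q => (q.1, q.2 + c)) := by
  apply PySem.List.eq_of_perm_of_pairwise_le_of_injective (fun p => toLex p)
    (fun a b hab => toLex_inj.mp hab)
  · exact (PySem.List.sorted_perm _ _ _).trans
      (((PySem.List.sorted_perm X _ _).map _).symm)
  · exact PySem.List.sorted_pairwise _ _
  · rw [List.pairwise_map]
    apply (PySem.List.sorted_pairwise X _).imp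
    intro a b hab
    rw [Prod.Lex.le_iff] at hab ⊢
    simp only [ofLex_toLex] at hab ⊢
    rcases hab with h | ⟨h1, h2⟩
    · exact Or.inl h
    · exact Or.inr ⟨by rw [h1], by omega⟩

lemma erase_filter_perm (L : List (Int × Int)) (a : Int × Int) (ha : a ∈ L)
    (pred : Int × Int → Bool) (hpa : pred a = false) :
    ((L.erase a).filter pred).Perm (L.filter pred) := by
  have h1 : L.Perm (a :: L.erase a) := List.perm_cons_erase ha
  have h2 := h1.filter pred
  rw [List.filter_cons, hpa] at h2
  simp only [Bool.false_eq_true, if_neg, not_false_iff] at h2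
  exact h2.symm

-- the lexicographic minimum of the pair list is (min value, its first position)
lemma min_pairs (nums : List Int) (p : Nat) (hplt : p < nums.length)
    (hmin : ∀ k, (hk : k < nums.length) → nums[p] ≤ nums[k])
    (hfirst : ∀ k, (hk : k < nums.length) → k < p → nums[p] < nums[k]) :
    PySem.List.min? (pairsOf nums) (fun q => toLex q) = some (nums[p], (p : Int)) := by
  have hw : ((nums[p], (p : Int)) : Int × Int) ∈ pairsOf nums :=
    (mem_pairsOf nums _).mpr ⟨p, hplt, rfl⟩
  have hwmin : ∀ q ∈ pairsOf nums, toLex ((nums[p], (p : Int)) : Int × Int) ≤ toLex q := by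
    intro q hq
    obtain ⟨k, hk, rfl⟩ := (mem_pairsOf nums q).mp hq
    rw [Prod.Lex.le_iff]
    simp only [ofLex_toLex]
    rcases lt_or_ge (nums[p] : Int) nums[k] with h | h
    · exact Or.inl h
    · have heq : nums[p] = nums[k] := le_antisymm (hmin k hk) h
      refine Or.inr ⟨heq, ?_⟩
      by_contra hc
      push_neg at hc
      have hkp : k < p := by exact_mod_cast hc
      exact absurd heq (ne_of_lt (hfirst k hk hkp))
  match hq0 : PySem.List.min? (pairsOf nums) (fun q => toLex q) with
  | none =>
    have : pairsOf nums = [] := (PySem.List.min?_eq_none_iff _ _).mp hq0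
    rw [this] at hw
    exact absurd hw (List.not_mem_nil)
  | some q0 =>
    have hq0mem := PySem.List.min?_mem hq0
    have hq0min := PySem.List.min?_isMin hq0
    have h1 : toLex q0 ≤ toLex ((nums[p], (p : Int)) : Int × Int) := hq0min _ hw
    have h2 : toLex ((nums[p], (p : Int)) : Int × Int) ≤ toLex q0 := hwmin q0 hq0mem
    have : q0 = ((nums[p], (p : Int)) : Int × Int) := toLex_inj.mp (le_antisymm h1 h2)
    rw [this]

-- ----- the A-side recursion: taking the global (value, index)-minimum splits the fold -----

lemma splitA (nums : List Int) (p : Nat) (hplt : p < nums.length)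
    (hmin : ∀ k, (hk : k < nums.length) → nums[p] ≤ nums[k])
    (hfirst : ∀ k, (hk : k < nums.length) → k < p → nums[p] < nums[k]) :
    afold nums = nums[p] + afold (nums.take (p - 1)) + afold (nums.drop (p + 2)) := by
  have h1 := min_pairs nums p hplt hmin hfirst
  have h2 := sorted_cons_of_min (pairsOf nums) _ h1
  set P : Int := (p : Int) with hP
  set w : Int × Int := (nums[p], P) with hw
  set f1 : Int → Bool := fun j => if j = P - 1 ∨ j = P ∨ j = P + 1 then true else false with hf1
  set R := PySem.List.sorted ((pairsOf nums).erase w) (fun p => toLex p) false with hR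
  have hstep1 : mStep ((fun _ => false), 0) w = (f1, nums[p]) := by
    simp [mStep, hf1, hw]
  unfold afold
  rw [h2, List.foldl_cons, hstep1]
  rw [mfold_add R f1 nums[p]]
  -- drop the pairs at the three already-marked indices
  have hdrop := mfold_drop3 R f1 0 (P - 1) P (P + 1)
    (by simp [hf1]) (by simp [hf1]) (by simp [hf1])
  rw [hdrop]
  set G : Int × Int → Bool := fun q => !(q.2 == P - 1 || q.2 == P || q.2 == P + 1) with hG
  set RG := R.filter G with hRG
  -- every remaining index is ≤ P-2 or ≥ P+2, so the two sides commute and the fold splits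
  have hGmem : ∀ q ∈ RG, q.2 ≤ P - 2 ∨ P + 2 ≤ q.2 := by
    intro q hq
    have hGq : G q = true := List.of_mem_filter hq
    have : ¬ (q.2 = P - 1 ∨ q.2 = P ∨ q.2 = P + 1) := by
      intro h
      rcases h with h | h | h <;> simp [hG, h] at hGq
    omega
  set Pd : Int × Int → Bool := fun q => decide (q.2 < P) with hPd
  have hsplit := mfold_split RG (f1, 0) Pd (by
    intro a ha b hb hPa hPb st'
    apply mstep_comm
    have h1 : a.2 < P := by
      have := hPa; rw [hPd] at this; simpa using this
    have h2 : ¬ (b.2 < P) := by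
      have := hPb; rw [hPd] at this; simpa using this
    rcases hGmem a ha with h | h
    · rcases hGmem b hb with h' | h' <;> omega
    · omega)
  rw [hsplit]
  -- the two filtered lists are the sorted pair lists of the two slices
  have hLLpt : ∀ (q : Int × Int), (Pd q && G q) = decide (q.2 < P - 1) := by
    intro q
    by_cases h : q.2 < P - 1
    · simp [hPd, hG, h, show q.2 < P by omega, show q.2 ≠ P - 1 by omega,
        show q.2 ≠ P by omega, show q.2 ≠ P + 1 by omega]
    · by_cases h2 : q.2 < P
      · simp [hPd, hG, h, h2, show q.2 = P - 1 by omega]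
      · simp [hPd, hG, h, h2]
  have hRRpt : ∀ (q : Int × Int), ((!Pd q) && G q) = decide (P + 2 ≤ q.2) := by
    intro q
    by_cases h : P + 2 ≤ q.2
    · simp [hPd, hG, h, show ¬ (q.2 < P) by omega, show q.2 ≠ P - 1 by omega,
        show q.2 ≠ P by omega, show q.2 ≠ P + 1 by omega]
    · by_cases h2 : q.2 < P
      · simp [hPd, hG, h, h2]
      · simp [hPd, hG, h, h2, show q.2 = P ∨ q.2 = P + 1 by omega]
        intro hne
        omega
  have hwL : (fun (q : Int × Int) => decide (q.2 < P - 1)) w = false := by simp [hw]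
  have hwR : (fun (q : Int × Int) => decide (P + 2 ≤ q.2)) w = false := by simp [hw]
  have hLL : RG.filter Pd = PySem.List.sorted (pairsOf (nums.take (p - 1))) (fun p => toLex p) false := by
    rw [hRG, List.filter_filter]
    rw [List.filter_congr (fun q _ => hLLpt q)]
    rw [hR, sorted_filter]
    rw [sorted_congr_perm _ _ (erase_filter_perm (pairsOf nums) w
      ((mem_pairsOf nums w).mpr ⟨p, hplt, rfl⟩) _ hwL)]
    rw [pairs_filter_lt nums (P - 1), show (P - 1).toNat = p - 1 by omega]
  have hRR : RG.filter (fun q => !Pd q) =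
      (PySem.List.sorted (pairsOf (nums.drop (p + 2))) (fun p => toLex p) false).map
        (fun q => (q.1, q.2 + (P + 2))) := by
    rw [hRG, List.filter_filter]
    rw [List.filter_congr (fun q _ => hRRpt q)]
    rw [hR, sorted_filter]
    rw [sorted_congr_perm _ _ (erase_filter_perm (pairsOf nums) w
      ((mem_pairsOf nums w).mpr ⟨p, hplt, rfl⟩) _ hwR)]
    rw [pairs_filter_ge nums (P + 2) (by omega), show (P + 2).toNat = p + 2 by omega]
    rw [sorted_map_shift]
  rw [hLL, hRR]
  set LL := PySem.List.sorted (pairsOf (nums.take (p - 1))) (fun p => toLex p) false with hLLd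
  set X := PySem.List.sorted (pairsOf (nums.drop (p + 2))) (fun p => toLex p) false with hX
  -- left stage: agrees with a fresh fold over the left slice
  have hmemLL : ∀ q ∈ LL, q.2 < P - 1 := by
    intro q hq
    have : q ∈ pairsOf (nums.take (p - 1)) := (PySem.List.mem_sorted _ _ _ _).mp hq
    obtain ⟨k, hk, rfl⟩ := (mem_pairsOf _ q).mp this
    simp only
    rw [List.length_take] at hk
    omega
  have hsimL := msim LL (fun j => j < P - 1) 0 f1 (fun _ => false) 0
    (fun q hq => by simpa using hmemLL q hq)
    (fun j hj => by simp [hf1]; omega)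
  have hmapid : LL.map (fun q => (q.1, q.2 - 0)) = LL := by
    rw [show (fun (q : Int × Int) => (q.1, q.2 - 0)) = id from by funext q; simp, List.map_id]
  rw [hmapid] at hsimL
  -- the left stage's final marks are still clear at P+2 and beyond
  have hhigh := mfold_preserve_high LL f1 0 P (fun q hq => by have := hmemLL q hq; omega)
  set st1 := LL.foldl mStep (f1, 0) with hst1
  have hst1pair : st1 = (st1.1, st1.2) := rfl
  rw [hst1pair, mfold_add]
  have hscoreL : st1.2 = afold (nums.take (p - 1)) := by
    rw [hst1]
    rw [hsimL.1]
    rfl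
  -- right stage: agrees with a fresh fold over the right slice
  have hsimR := msim (X.map (fun q => (q.1, q.2 + (P + 2)))) (fun j => 0 ≤ j) (P + 2) st1.1 (fun _ => false) 0
    (by
      intro q hq
      obtain ⟨r, hr, rfl⟩ := List.mem_map.mp hq
      have : r ∈ pairsOf (nums.drop (p + 2)) := (PySem.List.mem_sorted _ _ _ _).mp hr
      obtain ⟨k, hk, rfl⟩ := (mem_pairsOf _ r).mp this
      simp only
      omega)
    (by
      intro j hj
      rw [hst1, hhigh (j + (P + 2)) (by omega)]
      simp [hf1]
      omega)
  have hmapdown : (X.map (fun q => (q.1, q.2 + (P + 2)))).map (fun q => (q.1, q.2 - (P + 2))) = X := by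
    rw [List.map_map]
    rw [show ((fun (q : Int × Int) => (q.1, q.2 - (P + 2))) ∘ (fun (q : Int × Int) => (q.1, q.2 + (P + 2))))
        = id from by funext q; simp]
    rw [List.map_id]
  rw [hmapdown] at hsimR
  have hscoreR : ((X.map (fun q => (q.1, q.2 + (P + 2)))).foldl mStep (st1.1, 0)).2 = afold (nums.drop (p + 2)) := by
    rw [hsimR.1]
    rfl
  rw [hscoreL, hscoreR]
  have e1 : (List.foldl mStep (fun _ => false, 0) LL).2 = afold (nums.take (p - 1)) := rfl
  have e2 : (List.foldl mStep (fun _ => false, 0) X).2 = afold (nums.drop (p + 2)) := rfl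
  rw [e1, e2]
  ring

-- A's port equals the abstract fold
lemma A_eq_afold (nums : List Int) : findScoreV2 nums = afold nums := by
  show findScoreV2Loop (pairsOf nums) (List.replicate nums.length false) 0 = afold nums
  rw [loop_eq_fold (pairsOf nums).length (pairsOf nums) rfl]
  unfold afold
  apply fold_bridge
  · intro q hq
    have : q ∈ pairsOf nums := (PySem.List.mem_sorted _ _ _ _).mp hq
    obtain ⟨k, hk, rfl⟩ := (mem_pairsOf _ q).mp this
    simp only [List.length_replicate]
    omega
  · intro j hj0 hjlt
    rw [PySem.List.pyGetD_eq_getElem _ false hj0 (by simpa using hjlt)]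
    simp

-- ----- B-side: indexing congruences and loop lemmas -----

lemma pyGetD_as_getD (xs : List Int) (k : Int) (d : Int) (hk0 : 0 ≤ k) :
    PySem.List.pyGetD xs k d = xs.getD k.toNat d := by
  have h := PySem.List.pyGetD_natCast xs k.toNat d
  rw [show ((k.toNat : Nat) : Int) = k by omega] at h
  exact h

lemma pyGetD_take (xs : List Int) (m : Nat) (k : Int) (hk0 : 0 ≤ k) (hk : k < (m : Int)) :
    PySem.List.pyGetD (xs.take m) k 0 = PySem.List.pyGetD xs k 0 := by
  rw [pyGetD_as_getD _ _ _ hk0, pyGetD_as_getD _ _ _ hk0]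
  rw [List.getD_eq_getElem?_getD, List.getD_eq_getElem?_getD, List.getElem?_take,
    if_pos (by omega)]

lemma pyGetD_drop (xs : List Int) (t : Nat) (k : Int) (hk0 : 0 ≤ k) :
    PySem.List.pyGetD (xs.drop t) k 0 = PySem.List.pyGetD xs (k + (t : Int)) 0 := by
  rw [pyGetD_as_getD _ _ _ hk0, pyGetD_as_getD _ _ _ (by omega)]
  rw [List.getD_eq_getElem?_getD, List.getD_eq_getElem?_getD, List.getElem?_drop]
  rw [show t + k.toNat = (k + (t : Int)).toNat by omega]

-- one-step unfoldings of the three loops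
lemma runEnd_step (nums : List Int) (j : Int)
    (h : j + 1 < (nums.length : Int) ∧ PySem.List.pyGetD nums (j + 1) 0 < PySem.List.pyGetD nums j 0) :
    runEnd nums j = runEnd nums (j + 1) := by
  conv_lhs => rw [runEnd]
  rw [if_pos h]

lemma runEnd_stop_eq (nums : List Int) (j : Int)
    (h : ¬ (j + 1 < (nums.length : Int) ∧ PySem.List.pyGetD nums (j + 1) 0 < PySem.List.pyGetD nums j 0)) :
    runEnd nums j = j := by
  conv_lhs => rw [runEnd]
  rw [if_neg h]

lemma sumBack_step (nums : List Int) (k i s : Int) (h : i ≤ k) :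
    sumBack nums k i s = sumBack nums (k - 2) i (s + PySem.List.pyGetD nums k 0) := by
  conv_lhs => rw [sumBack]
  rw [if_pos h]

lemma sumBack_stop (nums : List Int) (k i s : Int) (h : ¬ i ≤ k) :
    sumBack nums k i s = s := by
  conv_lhs => rw [sumBack]
  rw [if_neg h]

lemma outerLoop_step (nums : List Int) (i s : Int) (h : i < (nums.length : Int)) :
    outerLoop nums i s = outerLoop nums (runEnd nums i + 2) (sumBack nums (runEnd nums i) i s) := by
  conv_lhs => rw [outerLoop]
  rw [if_pos h]

lemma outerLoop_stop (nums : List Int) (i s : Int) (h : ¬ i < (nums.length : Int)) :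
    outerLoop nums i s = s := by
  conv_lhs => rw [outerLoop]
  rw [if_neg h]

-- the inner while stops exactly at its result
lemma runEnd_stop (nums : List Int) (j : Int) :
    ¬ (runEnd nums j + 1 < (nums.length : Int) ∧
       PySem.List.pyGetD nums (runEnd nums j + 1) 0 < PySem.List.pyGetD nums (runEnd nums j) 0) := by
  fun_induction runEnd with
  | case1 j h ih => exact ih
  | case2 j h => exact h

-- every position strictly before the result steps (strict decrease)
lemma runEnd_steps (nums : List Int) (i : Int) :
    ∀ k, i ≤ k → k < runEnd nums i →
      (k + 1 < (nums.length : Int) ∧ PySem.List.pyGetD nums (k + 1) 0 < PySem.List.pyGetD nums k 0) := by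
  fun_induction runEnd with
  | case1 i h ih =>
    intro k hik hk
    by_cases hki : k = i
    · subst hki; exact h
    · exact ih k (by omega) hk
  | case2 i h =>
    intro k hik hk
    omega

-- characterization: any j with all steps before it and a stop at it is the run end
lemma runEnd_unique (nums : List Int) (j : Int)
    (hstop : ¬ (j + 1 < (nums.length : Int) ∧
        PySem.List.pyGetD nums (j + 1) 0 < PySem.List.pyGetD nums j 0)) :
    ∀ (K : Nat) (i : Int), i ≤ j → (j - i).toNat ≤ K →
    (∀ k, i ≤ k → k < j →
      (k + 1 < (nums.length : Int) ∧ PySem.List.pyGetD nums (k + 1) 0 < PySem.List.pyGetD nums k 0)) →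
    runEnd nums i = j := by
  intro K
  induction K with
  | zero =>
    intro i hij hd _
    have : i = j := by omega
    subst this
    exact runEnd_stop_eq nums i hstop
  | succ d ihd =>
    intro i hij hd hsteps
    by_cases hieq : i = j
    · subst hieq
      exact runEnd_stop_eq nums i hstop
    · rw [runEnd_step nums i (hsteps i le_rfl (by omega))]
      exact ihd (i + 1) (by omega) (by omega) (fun k hk1 hk2 => hsteps k (by omega) hk2)

-- score threads additively through the innermost while
lemma sumBack_add (nums : List Int) (s i : Int) :
    ∀ (k t : Int), sumBack nums k i (s + t) = s + sumBack nums k i t := by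
  intro k t
  fun_induction sumBack nums k i t with
  | case1 k t h ih =>
    rw [sumBack_step nums k i (s + t) h,
      show s + t + PySem.List.pyGetD nums k 0 = s + (t + PySem.List.pyGetD nums k 0) by ring]
    exact ih
  | case2 k t h => rw [sumBack_stop nums k i (s + t) h]

-- the innermost while only reads indices in [i, k]
lemma sumBack_congr (xs ys : List Int) (K : Int) :
    ∀ (Kf : Nat) (k i s : Int), k ≤ K → (k + 2 - i).toNat ≤ Kf →
    (∀ m, i ≤ m → m ≤ K → PySem.List.pyGetD xs m 0 = PySem.List.pyGetD ys m 0) →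
    sumBack xs k i s = sumBack ys k i s := by
  intro Kf
  induction Kf with
  | zero =>
    intro k i s _ hd _
    rw [sumBack_stop xs k i s (by omega), sumBack_stop ys k i s (by omega)]
  | succ d ihd =>
    intro k i s hkK hd hread
    by_cases h : i ≤ k
    · rw [sumBack_step xs k i s h, sumBack_step ys k i s h, hread k h hkK]
      exact ihd (k - 2) i _ (by omega) (by omega) hread
    · rw [sumBack_stop xs k i s h, sumBack_stop ys k i s h]

-- shifting the array left by t shifts the innermost while
lemma sumBack_shift (xs : List Int) (t : Nat) :
    ∀ (Kf : Nat) (k i s : Int), 0 ≤ i → (k + 2 - i).toNat ≤ Kf →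
    sumBack (xs.drop t) k i s = sumBack xs (k + (t : Int)) (i + (t : Int)) s := by
  intro Kf
  induction Kf with
  | zero =>
    intro k i s hi0 hd
    rw [sumBack_stop _ k i s (by omega), sumBack_stop xs _ _ s (by omega)]
  | succ d ihd =>
    intro k i s hi0 hd
    by_cases h : i ≤ k
    · rw [sumBack_step _ k i s h, sumBack_step xs _ _ s (by omega : i + (t : Int) ≤ k + (t : Int))]
      rw [pyGetD_drop xs t k (by omega)]
      rw [show k + (t : Int) - 2 = (k - 2) + (t : Int) by ring]
      exact ihd (k - 2) i _ hi0 (by omega)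
    · rw [sumBack_stop _ k i s h, sumBack_stop xs _ _ s (by omega)]

-- the inner while shifts with the array
lemma runEnd_shift (xs : List Int) (t : Nat) (j : Int) (hj : 0 ≤ j) :
    runEnd (xs.drop t) j = runEnd xs (j + (t : Int)) - (t : Int) := by
  have hle := le_runEnd xs (j + (t : Int))
  apply runEnd_unique (xs.drop t) (runEnd xs (j + (t : Int)) - (t : Int))
    (by
      intro ⟨hb, hv⟩
      apply runEnd_stop xs (j + (t : Int))
      constructor
      · rw [List.length_drop] at hb
        push_cast at hb ⊢
        omega
      · rw [pyGetD_drop xs t _ (by omega), pyGetD_drop xs t _ (by omega)] at hv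
        rw [show runEnd xs (j + (t : Int)) - (t : Int) + 1 + (t : Int)
            = runEnd xs (j + (t : Int)) + 1 by ring] at hv
        rw [show runEnd xs (j + (t : Int)) - (t : Int) + (t : Int)
            = runEnd xs (j + (t : Int)) by ring] at hv
        exact hv)
    ((runEnd xs (j + (t : Int)) - (t : Int) - j).toNat) j (by omega) (by omega)
    (by
      intro k hk1 hk2
      have hs := runEnd_steps xs (j + (t : Int)) (k + (t : Int)) (by omega) (by omega)
      constructor
      · rw [List.length_drop]
        push_cast
        omega
      · rw [pyGetD_drop xs t _ (by omega), pyGetD_drop xs t _ (by omega)]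
        rw [show k + 1 + (t : Int) = k + (t : Int) + 1 by ring]
        exact hs.2)

-- score threads additively through the outer while
lemma outerLoop_add (nums : List Int) (s : Int) :
    ∀ (Kf : Nat) (i t : Int), ((nums.length : Int) - i).toNat ≤ Kf →
    outerLoop nums i (s + t) = s + outerLoop nums i t := by
  intro Kf
  induction Kf with
  | zero =>
    intro i t hd
    rw [outerLoop_stop nums i _ (by omega), outerLoop_stop nums i t (by omega)]
  | succ d ihd =>
    intro i t hd
    by_cases h : i < (nums.length : Int)
    · rw [outerLoop_step nums i _ h, outerLoop_step nums i t h]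
      rw [sumBack_add]
      have hle := le_runEnd nums i
      exact ihd (runEnd nums i + 2) _ (by omega)
    · rw [outerLoop_stop nums i _ h, outerLoop_stop nums i t h]

-- the outer while shifts with the array
lemma outerLoop_shift (xs : List Int) (t : Nat) :
    ∀ (Kf : Nat) (i s : Int), 0 ≤ i → ((xs.length : Int) - (t : Int) - i).toNat ≤ Kf →
    outerLoop (xs.drop t) i s = outerLoop xs (i + (t : Int)) s := by
  intro Kf
  induction Kf with
  | zero =>
    intro i s hi0 hd
    rw [outerLoop_stop _ i s (by rw [List.length_drop]; push_cast; omega),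
      outerLoop_stop xs _ s (by omega)]
  | succ d ihd =>
    intro i s hi0 hd
    by_cases h : i + (t : Int) < (xs.length : Int)
    · rw [outerLoop_step _ i s (by rw [List.length_drop]; push_cast; omega),
        outerLoop_step xs _ s h]
      rw [runEnd_shift xs t i hi0]
      rw [sumBack_shift xs t ((runEnd xs (i + (t : Int)) - (t : Int) + 2 - i).toNat) _ _ _ hi0 le_rfl]
      rw [show runEnd xs (i + (t : Int)) - (t : Int) + (t : Int) = runEnd xs (i + (t : Int)) by ring]
      have hle := le_runEnd xs (i + (t : Int))
      have hrec := ihd (runEnd xs (i + (t : Int)) - (t : Int) + 2)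
        (sumBack xs (runEnd xs (i + (t : Int))) (i + (t : Int)) s) (by omega) (by omega)
      rw [show runEnd xs (i + (t : Int)) - (t : Int) + 2 + (t : Int)
          = runEnd xs (i + (t : Int)) + 2 by ring] at hrec
      exact hrec
    · rw [outerLoop_stop _ i s (by rw [List.length_drop]; push_cast; omega),
        outerLoop_stop xs _ s h]

-- reading at a Nat position
lemma pyGetD_at_nat (nums : List Int) (k : Nat) (hk : k < nums.length) :
    PySem.List.pyGetD nums (k : Int) 0 = nums[k] := by
  rw [PySem.List.pyGetD_eq_getElem nums 0 (by omega) (by exact_mod_cast hk)]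
  simp

-- ----- the B-side recursion: the outer loop splits at the first global minimum -----

-- terminal step: the current run of nums ends exactly at the minimum's position p
lemma termB (nums : List Int) (p : Nat) (hplt : p < nums.length)
    (i s : Int) (h0 : 0 ≤ i) (hiP : i ≤ (p : Int)) (hrun : runEnd nums i = (p : Int)) :
    outerLoop nums i s =
      outerLoop (nums.take (p - 1)) i s + nums[p] + outerLoop nums ((p : Int) + 2) 0 := by
  have hn : (p : Int) < (nums.length : Int) := by exact_mod_cast hplt
  have hPget : PySem.List.pyGetD nums ((p : Int)) 0 = nums[p] := pyGetD_at_nat nums p hplt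
  rw [outerLoop_step nums i s (by omega), hrun]
  rw [show sumBack nums (p : Int) i s = sumBack nums (p : Int) i s + 0 by ring]
  rw [outerLoop_add nums (sumBack nums (p : Int) i s)
    (((nums.length : Int) - ((p : Int) + 2)).toNat) ((p : Int) + 2) 0 le_rfl]
  by_cases hcase : (p : Int) - 1 ≤ i
  · -- i is P-1 or P: the (truncated) left run is empty, only nums[p] is picked here
    have hsum : sumBack nums (p : Int) i s = s + nums[p] := by
      rw [sumBack_step nums (p : Int) i s (by omega), sumBack_stop nums _ i _ (by omega), hPget]
    have htake : outerLoop (nums.take (p - 1)) i s = s :=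
      outerLoop_stop _ i s (by rw [List.length_take]; push_cast; omega)
    rw [hsum, htake]
  · -- i ≤ P-2: the run continues in the truncated array up to p-2
    have hreads : ∀ m, i ≤ m → m ≤ (p : Int) - 2 →
        PySem.List.pyGetD (nums.take (p - 1)) m 0 = PySem.List.pyGetD nums m 0 := by
      intro m h1 h2
      exact pyGetD_take nums (p - 1) m (by omega) (by omega)
    have hsum1 : sumBack nums (p : Int) i s = nums[p] + sumBack nums ((p : Int) - 2) i s := by
      rw [sumBack_step nums (p : Int) i s (by omega), hPget,
        show s + nums[p] = nums[p] + s by ring, sumBack_add]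
    have hsum2 : sumBack nums ((p : Int) - 2) i s = sumBack (nums.take (p - 1)) ((p : Int) - 2) i s := by
      refine (sumBack_congr (nums.take (p - 1)) nums ((p : Int) - 2)
        (((p : Int) - 2 + 2 - i).toNat) _ _ _ le_rfl le_rfl ?_).symm
      intro m h1 h2
      exact hreads m h1 h2
    have hrunt : runEnd (nums.take (p - 1)) i = (p : Int) - 2 := by
      apply runEnd_unique (nums.take (p - 1)) ((p : Int) - 2)
        (by
          intro ⟨hb, _⟩
          rw [List.length_take] at hb
          push_cast at hb
          omega)
        (((p : Int) - 2 - i).toNat) i (by omega) le_rfl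
      intro k hk1 hk2
      have hs := runEnd_steps nums i k hk1 (by omega)
      constructor
      · rw [List.length_take]
        push_cast
        omega
      · rw [hreads (k + 1) (by omega) (by omega), hreads k (by omega) (by omega)]
        exact hs.2
    rw [outerLoop_step (nums.take (p - 1)) i s
      (by rw [List.length_take]; push_cast; omega), hrunt]
    rw [show (p : Int) - 2 + 2 = (p : Int) by ring]
    rw [outerLoop_stop (nums.take (p - 1)) (p : Int) _
      (by rw [List.length_take]; push_cast; omega)]
    rw [hsum1, hsum2]
    ring

-- the outer loop walks the runs left of p in nums and in nums[:p-1] in lockstep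
lemma splitB_loop (nums : List Int) (p : Nat) (hplt : p < nums.length)
    (hmin : ∀ k, (hk : k < nums.length) → nums[p] ≤ nums[k])
    (hfirst : ∀ k, (hk : k < nums.length) → k < p → nums[p] < nums[k]) :
    ∀ (K : Nat) (i s : Int), 0 ≤ i → i ≤ (p : Int) → ((p : Int) - i).toNat ≤ K →
    outerLoop nums i s =
      outerLoop (nums.take (p - 1)) i s + nums[p] + outerLoop nums ((p : Int) + 2) 0 := by
  have hn : (p : Int) < (nums.length : Int) := by exact_mod_cast hplt
  have hnotdec : ¬ ((p : Int) + 1 < (nums.length : Int) ∧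
      PySem.List.pyGetD nums ((p : Int) + 1) 0 < PySem.List.pyGetD nums ((p : Int)) 0) := by
    intro ⟨hb, hv⟩
    rw [pyGetD_at_nat nums p hplt] at hv
    rw [show (p : Int) + 1 = ((p + 1 : Nat) : Int) by push_cast; ring] at hv
    rw [pyGetD_at_nat nums (p + 1) (by omega)] at hv
    have := hmin (p + 1) (by omega)
    omega
  have hrunP : runEnd nums (p : Int) = (p : Int) := runEnd_stop_eq nums (p : Int) hnotdec
  have hle_P : ∀ i : Int, 0 ≤ i → i ≤ (p : Int) → runEnd nums i ≤ (p : Int) := by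
    intro i h1 h2
    by_contra hgt
    push_neg at hgt
    exact hnotdec (runEnd_steps nums i (p : Int) (by omega) (by omega))
  have hne_Pm1 : ∀ i : Int, 0 ≤ i → i ≤ (p : Int) - 1 → runEnd nums i ≠ (p : Int) - 1 := by
    intro i h1 h2 heq
    have hst := runEnd_stop nums i
    rw [heq] at hst
    apply hst
    constructor
    · omega
    · rw [show (p : Int) - 1 + 1 = (p : Int) by ring, pyGetD_at_nat nums p hplt]
      rw [show (p : Int) - 1 = ((p - 1 : Nat) : Int) by push_cast [Nat.cast_sub (by omega : 1 ≤ p)]; ring]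
      rw [pyGetD_at_nat nums (p - 1) (by omega)]
      exact hfirst (p - 1) (by omega) (by omega)
  intro K
  induction K with
  | zero =>
    intro i s h0 hiP hd
    have : i = (p : Int) := by omega
    rw [this]
    exact termB nums p hplt (p : Int) s (by omega) le_rfl hrunP
  | succ d ihd =>
    intro i s h0 hiP hd
    have hji := le_runEnd nums i
    have hjP := hle_P i h0 hiP
    by_cases hj : runEnd nums i = (p : Int)
    · exact termB nums p hplt i s h0 hiP hj
    · have hiPm1 : i ≤ (p : Int) - 1 := by
        by_contra hc
        have : i = (p : Int) := by omega
        subst this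
        exact hj hrunP
      have hj2 : runEnd nums i ≤ (p : Int) - 2 := by
        have := hne_Pm1 i h0 hiPm1
        omega
      set j := runEnd nums i with hjd
      have hreads : ∀ m, 0 ≤ m → m ≤ (p : Int) - 2 →
          PySem.List.pyGetD (nums.take (p - 1)) m 0 = PySem.List.pyGetD nums m 0 := by
        intro m h1 h2
        exact pyGetD_take nums (p - 1) m (by omega) (by omega)
      have hrunt : runEnd (nums.take (p - 1)) i = j := by
        apply runEnd_unique (nums.take (p - 1)) j
          (by
            intro ⟨hb, hv⟩
            rw [List.length_take] at hb
            push_cast at hb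
            rw [hreads (j + 1) (by omega) (by omega), hreads j (by omega) (by omega)] at hv
            exact runEnd_stop nums i ⟨by omega, hv⟩)
          ((j - i).toNat) i (by omega) le_rfl
        intro k hk1 hk2
        have hs := runEnd_steps nums i k hk1 hk2
        constructor
        · rw [List.length_take]
          push_cast
          omega
        · rw [hreads (k + 1) (by omega) (by omega), hreads k (by omega) (by omega)]
          exact hs.2
      have hsumt : sumBack (nums.take (p - 1)) j i s = sumBack nums j i s := by
        refine sumBack_congr (nums.take (p - 1)) nums j ((j + 2 - i).toNat) _ _ _ le_rfl le_rfl ?_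
        intro m h1 h2
        exact hreads m (by omega) (by omega)
      rw [outerLoop_step nums i s (by omega)]
      rw [outerLoop_step (nums.take (p - 1)) i s (by rw [List.length_take]; push_cast; omega)]
      rw [hrunt, hsumt]
      exact ihd (j + 2) (sumBack nums j i s) (by omega) (by omega) (by omega)

lemma splitB (nums : List Int) (p : Nat) (hplt : p < nums.length)
    (hmin : ∀ k, (hk : k < nums.length) → nums[p] ≤ nums[k])
    (hfirst : ∀ k, (hk : k < nums.length) → k < p → nums[p] < nums[k]) :
    outerLoop nums 0 0 =
      nums[p] + outerLoop (nums.take (p - 1)) 0 0 + outerLoop (nums.drop (p + 2)) 0 0 := by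
  have h1 := splitB_loop nums p hplt hmin hfirst p 0 0 le_rfl (by omega) (by omega)
  have h2 : outerLoop (nums.drop (p + 2)) 0 0 = outerLoop nums ((p : Int) + 2) 0 := by
    have := outerLoop_shift nums (p + 2) (((nums.length : Int) - ((p + 2 : Nat) : Int)).toNat) 0 0
      le_rfl (by omega)
    rw [this]
    push_cast
    ring_nf
  rw [h1, h2]
  ring

-- ----- assembly: both sides satisfy the same argmin-split recursion -----

lemma afold_nil : afold [] = 0 := by
  simp [afold, pairsOf, PySem.List.enumerate_nil, PySem.List.sorted]

lemma alt_nil : findScoreV2_alt [] = 0 := by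
  rw [findScoreV2_alt]
  exact outerLoop_stop [] 0 0 (by simp)

lemma afold_eq_alt : ∀ (N : Nat) (nums : List Int), nums.length = N →
    afold nums = findScoreV2_alt nums := by
  intro N
  induction N using Nat.strong_induction_on with
  | _ N ih =>
    intro nums hlen
    match nums with
    | [] => rw [afold_nil, alt_nil]
    | x :: t =>
      have hm : PySem.List.min? (x :: t) (fun y => y) = some (t.foldl min x) :=
        PySem.List.min?_id_cons x t
      have hmem : t.foldl min x ∈ x :: t := PySem.List.min?_mem hm
      have hminv : ∀ y ∈ x :: t, t.foldl min x ≤ y := PySem.List.min?_isMin hm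
      obtain ⟨p, hp⟩ : ∃ p, PySem.List.index? (x :: t) (t.foldl min x) = some p :=
        Option.isSome_iff_exists.mp
          ((PySem.List.index?_isSome_iff (x :: t) (t.foldl min x)).mpr hmem)
      obtain ⟨hplt, hpval, hpfirst⟩ := PySem.List.getElem_of_index?_eq_some hp
      have hmin : ∀ k, (hk : k < (x :: t).length) → (x :: t)[p] ≤ (x :: t)[k] := by
        intro k hk
        rw [hpval]
        exact hminv _ (List.getElem_mem hk)
      have hfirst : ∀ k, (hk : k < (x :: t).length) → k < p → (x :: t)[p] < (x :: t)[k] := by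
        intro k hk hkp
        have hle := hmin k hk
        have hne : (x :: t)[k] ≠ (x :: t)[p] := by
          rw [hpval]
          exact hpfirst k hkp
        omega
      rw [splitA (x :: t) p hplt hmin hfirst]
      rw [ih ((x :: t).take (p - 1)).length (by rw [List.length_take]; omega) _ rfl]
      rw [ih ((x :: t).drop (p + 2)).length (by rw [List.length_drop]; omega) _ rfl]
      simp only [findScoreV2_alt]
      rw [splitB (x :: t) p hplt hmin hfirst]

-- ===== VERDICT (by name: the statement is the Claim_ definition above) =====
theorem findScoreV2_spec : Claim_equal_findScoreV2 := by
  intro nums _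
  show findScoreV2 nums = findScoreV2_alt nums
  rw [A_eq_afold]
  exact afold_eq_alt nums.length nums rfl
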